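-- pv_equiv track=rewrite | github.com/ai-asset-architecture/aaa-tools | aaa/runbook_runtime.py | _args_to_dict
-- ===== SOURCE A (Python) =====
-- from typing import Any
--
-- def _args_to_dict(args: list[str]) -> dict[str, Any]:
--     it = iter(args)
--     result = {}
--     for key in it:
--         try:
--             value = next(it)
--         except StopIteration:
--             value = ""
--         result[key] = value
--     return result
-- ===== SOURCE B (Python) =====
-- from itertools import zip_longest
-- from typing import Any
--
--
-- def _args_to_dict(args: list[str]) -> dict[str, Any]:
--     return dict(zip_longest(args[::2], args[1::2], fillvalue=""))
-- ===== Notes on version B (the rewrite author's own statement) =====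
-- stated objective: simpler
-- what changed: Replaces the explicit shared-iterator loop with try/except around next() by strided slicing into keys (args[::2]) and values (args[1::2]) recombined with itertools.zip_longest(fillvalue='') in a single expression.
import Mathlib
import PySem

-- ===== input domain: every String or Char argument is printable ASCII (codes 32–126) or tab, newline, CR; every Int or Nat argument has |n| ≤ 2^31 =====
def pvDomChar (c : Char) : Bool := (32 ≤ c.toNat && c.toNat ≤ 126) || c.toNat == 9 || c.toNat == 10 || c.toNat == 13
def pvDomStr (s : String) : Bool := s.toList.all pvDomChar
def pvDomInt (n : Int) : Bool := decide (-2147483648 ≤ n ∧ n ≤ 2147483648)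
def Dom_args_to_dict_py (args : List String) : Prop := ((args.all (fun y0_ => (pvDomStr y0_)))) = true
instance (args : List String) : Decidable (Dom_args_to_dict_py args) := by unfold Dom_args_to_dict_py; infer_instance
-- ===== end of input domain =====

-- B replaces A's shared-iterator pairing loop (try/except around next) by strided slicing
-- args[::2] / args[1::2] recombined with itertools.zip_longest(fillvalue="") — simpler, same cost.


-- ===== PORT A =====
-- A's for-loop over ONE shared iterator: take the next element as key, then try to take one
-- more as value (StopIteration → ""), insert, continue; transcribed as the two-at-a-time
-- structural recursion on the iterator's remaining contents, with the dict as accumulator.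
def argsLoopA (l : List String) (result : PySem.Dict String String) : PySem.Dict String String :=
  match l with
  | [] => result
  | [key] => result.insert key ""
  | key :: value :: rest => argsLoopA rest (result.insert key value)

def args_to_dict_py (args : List String) : List (String × String) :=
  (argsLoopA args PySem.Dict.empty).items

-- ===== PORT B =====
-- itertools.zip_longest(xs, ys, fillvalue=fill), hand-ported step for step (exact:
-- pads the shorter list with fill until both are exhausted).
def zipLongest (xs ys : List String) (fill : String) : List (String × String) :=
  match xs, ys with
  | [], [] => []
  | x :: xs, [] => (x, fill) :: zipLongest xs [] fill
  | [], y :: ys => (fill, y) :: zipLongest [] ys fill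
  | x :: xs, y :: ys => (x, y) :: zipLongest xs ys fill

def args_to_dict_py_alt (args : List String) : List (String × String) :=
  let keys := (PySem.List.slice? args none none 2).getD []        -- args[::2]
  let values := (PySem.List.slice? args (some 1) none 2).getD []  -- args[1::2]
  (PySem.Dict.ofList (zipLongest keys values "")).items

-- ===== PRECONDITION & SPEC =====
def Spec_args_to_dict_py (args : List String) (out : List (String × String)) : Prop := out = args_to_dict_py_alt args
instance (args : List String) (out : List (String × String)) : Decidable (Spec_args_to_dict_py args out) := by unfold Spec_args_to_dict_py; infer_instance

-- ===== CLAIM (what is proved, stated in full; the proofs are below) =====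
def Claim_equal_args_to_dict_py : Prop := ∀ (args : List String), Dom_args_to_dict_py args → Spec_args_to_dict_py args (args_to_dict_py args)

-- ===== LEMMAS AND PROOFS =====

-- one strided-slicing step: xs[::2] on x :: y :: rest is x followed by rest[::2]
theorem slice2_evens_step (x y : String) (rest : List String) :
    PySem.List.slice? (x :: y :: rest) none none 2
      = some (x :: (PySem.List.slice? rest none none 2).getD []) := by
  simp only [PySem.List.slice?, PySem.List.sliceIndices, List.length_cons]
  norm_num
  have h1 : (if (0:Int) ≤ (rest.length:Int) + 1 then (((rest.length:Int) + 1 + 1 + 2 - 1) / 2).toNat else 0)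
      = (((rest.length:Int) + 1) / 2).toNat + 1 := by split <;> omega
  have h2 : (if 0 < rest.length then (((rest.length:Int) + 2 - 1) / 2).toNat else 0)
      = (((rest.length:Int) + 1) / 2).toNat := by split <;> omega
  rw [h1, h2, List.range_succ_eq_map]
  simp only [List.filterMap_cons, List.filterMap_map]
  have h3 : ∀ k : Nat, (x :: y :: rest)[(2 * ((k:Int)+1)).toNat]? = rest[(2 * (k:Int)).toNat]? := by
    intro k
    have he : (2 * ((k:Int)+1)).toNat = (2 * (k:Int)).toNat + 2 := by omega
    rw [he]
    simp
  simp [h3]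

-- one strided-slicing step: xs[1::2] on x :: y :: rest is y followed by rest[1::2]
theorem slice2_odds_step (x y : String) (rest : List String) :
    PySem.List.slice? (x :: y :: rest) (some 1) none 2
      = some (y :: (PySem.List.slice? rest (some 1) none 2).getD []) := by
  match rest with
  | [] =>
    norm_num [PySem.List.slice?, PySem.List.sliceIndices]
    simp
  | z :: rest' =>
    simp only [PySem.List.slice?, PySem.List.sliceIndices, List.length_cons]
    norm_num
    have hm1 : min (1:Int) ((rest'.length:Int) + 1 + 1 + 1) = 1 := by omega
    rw [hm1]
    have h1 : (if (0:Int) ≤ (rest'.length:Int) + 1 then (((rest'.length:Int) + 1 + 1 + 1 - 1 + 2 - 1) / 2).toNat else 0)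
        = (((rest'.length:Int) + 1) / 2).toNat + 1 := by split <;> omega
    have h2 : (if 0 < rest'.length then (((rest'.length:Int) + 2 - 1) / 2).toNat else 0)
        = (((rest'.length:Int) + 1) / 2).toNat := by split <;> omega
    rw [h1, h2, List.range_succ_eq_map]
    simp only [List.filterMap_cons, List.filterMap_map]
    have h3 : ∀ k : Nat, (x :: y :: z :: rest')[(1 + 2 * ((k:Int)+1)).toNat]? = (z :: rest')[(1 + 2 * (k:Int)).toNat]? := by
      intro k
      have he : (1 + 2 * ((k:Int)+1)).toNat = (1 + 2 * (k:Int)).toNat + 2 := by omega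
      rw [he]
      simp
    simp [h3]

-- the even-position / odd-position sublists, structurally
def pvEvens : List String → List String
  | [] => []
  | [x] => [x]
  | x :: _ :: rest => x :: pvEvens rest

def pvOdds : List String → List String
  | [] => []
  | [_] => []
  | _ :: y :: rest => y :: pvOdds rest

theorem slice2_evens : ∀ (xs : List String),
    PySem.List.slice? xs none none 2 = some (pvEvens xs)
  | [] => rfl
  | [x] => by simp [PySem.List.slice?, PySem.List.sliceIndices, pvEvens]
  | x :: y :: rest => by
      rw [slice2_evens_step, slice2_evens rest]
      rfl

theorem slice2_odds : ∀ (xs : List String),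
    PySem.List.slice? xs (some 1) none 2 = some (pvOdds xs)
  | [] => rfl
  | [x] => by simp [PySem.List.slice?, PySem.List.sliceIndices, pvOdds]
  | x :: y :: rest => by
      rw [slice2_odds_step, slice2_odds rest]
      rfl

-- A's loop IS the fold of insert over B's zipped pair list
theorem argsLoopA_foldl : ∀ (xs : List String) (d : PySem.Dict String String),
    argsLoopA xs d
      = (zipLongest (pvEvens xs) (pvOdds xs) "").foldl (fun acc p => acc.insert p.1 p.2) d
  | [], _ => by simp [argsLoopA, pvEvens, pvOdds, zipLongest]
  | [k], _ => by simp [argsLoopA, pvEvens, pvOdds, zipLongest]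
  | k :: v :: rest, d => by
      simp [argsLoopA, pvEvens, pvOdds, zipLongest, argsLoopA_foldl rest]

-- ===== VERDICT (by name: the statement is the Claim_ definition above) =====
theorem args_to_dict_py_spec : Claim_equal_args_to_dict_py := by
  intro args _
  unfold Spec_args_to_dict_py args_to_dict_py args_to_dict_py_alt
  rw [slice2_evens, slice2_odds]
  simp only [Option.getD_some]
  rw [argsLoopA_foldl]
  rfl
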